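-- pv_equiv track=rewrite | github.com/fantasticphin/Pycharm | 3.7 Gaza/0827.stack2/card.tournament.py | party
-- ===== SOURCE A (Python) =====
-- def winner_winner_chicken_dinner(a,b): #우승자를 배출하는 함수
--     if a[0] - b[0] == 1 or a[0] - b[0] == -2:
--         return a
--     elif a[0] - b[0] == -1 or a[0] - b[0] == 2:
--         return b
--     else:
--         return a
--
-- def party(lisborn): #partition 함수를 통해 피봇 포인트 확보
--     if len(lisborn) == 2:
--         return winner_winner_chicken_dinner(lisborn[0], lisborn[1])
--     elif len(lisborn) == 1:
--         return lisborn[0]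
--     else:
--         if len(lisborn)%2 == 1:
--             pvt = len(lisborn)//2 #피봇 포인트 (중간값을 조정 후 확보)
--         else:
--             pvt = (len(lisborn)-1)//2
--     apt = party(lisborn[0:pvt+1])
--     bpt = party(lisborn[pvt+1:len(lisborn)])
--     return winner_winner_chicken_dinner(apt,bpt)
-- ===== SOURCE B (Python) =====
-- def party(lisborn):
--     def _beats(a, b):
--         d = a[0] - b[0]
--         if d == 1 or d == -2:
--             return a
--         if d == -1 or d == 2:
--             return b
--         return a
--
--     work = [lisborn]   # pending segments; None marks a deferred combine of the top two results
--     results = []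
--     while work:
--         seg = work.pop()
--         if seg is None:
--             b = results.pop()
--             a = results.pop()
--             results.append(_beats(a, b))
--         elif len(seg) >= 3:
--             k = (len(seg) + 1) // 2   # left half gets the extra element, as in the split tree
--             work.append(None)
--             work.append(seg[k:])
--             work.append(seg[:k])
--         elif len(seg) == 1:
--             results.append(seg[0])
--         else:
--             results.append(_beats(seg[0], seg[1]))
--     return results[0]
-- ===== Notes on version B (the rewrite author's own statement) =====
-- stated objective: alternative
-- what changed: Replaces A's divide-and-conquer recursion with an iterative worklist of pending segments plus a result stack (None entries mark deferred combines), preserving the ceil/floor split and the left-then-right winner order.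
import Mathlib
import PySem

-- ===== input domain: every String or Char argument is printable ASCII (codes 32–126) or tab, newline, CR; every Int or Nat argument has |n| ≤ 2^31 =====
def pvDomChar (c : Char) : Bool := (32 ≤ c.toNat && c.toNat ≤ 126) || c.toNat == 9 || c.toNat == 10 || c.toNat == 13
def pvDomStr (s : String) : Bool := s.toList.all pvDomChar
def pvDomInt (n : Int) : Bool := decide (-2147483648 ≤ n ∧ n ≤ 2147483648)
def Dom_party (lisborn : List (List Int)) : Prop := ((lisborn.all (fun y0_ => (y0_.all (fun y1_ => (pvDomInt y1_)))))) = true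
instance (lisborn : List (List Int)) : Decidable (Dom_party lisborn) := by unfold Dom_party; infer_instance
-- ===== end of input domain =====

-- B re-implements the tournament iteratively with an explicit worklist of pending
-- segments and a result stack instead of A's recursion (objective: alternative, same cost).

-- ===== PORT A =====
-- winner_winner_chicken_dinner; a[0]/b[0] ported as pyGetD (in range under Pre_party)
def wwcdA (a b : List Int) : List Int :=
  if PySem.List.pyGetD a 0 0 - PySem.List.pyGetD b 0 0 = 1 ∨
     PySem.List.pyGetD a 0 0 - PySem.List.pyGetD b 0 0 = -2 then a
  else if PySem.List.pyGetD a 0 0 - PySem.List.pyGetD b 0 0 = -1 ∨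
          PySem.List.pyGetD a 0 0 - PySem.List.pyGetD b 0 0 = 2 then b
  else a

-- pvt = len//2 if len odd else (len-1)//2
def pvtA (n : Int) : Int :=
  if PySem.Int.mod n 2 = 1 then PySem.Int.floordiv n 2 else PySem.Int.floordiv (n - 1) 2

-- termination helper for the port (cited by decreasing_by below)
lemma pvtA_succ (N : Nat) (h : 3 ≤ N) : pvtA (N : Int) + 1 = ((N + 1) / 2 : Nat) := by
  unfold pvtA
  rw [PySem.Int.mod_eq_emod_of_pos (by omega : (0:Int) < 2),
      PySem.Int.floordiv_eq_ediv_of_pos (a := (N : Int)) (by omega),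
      PySem.Int.floordiv_eq_ediv_of_pos (a := (N : Int) - 1) (by omega)]
  split_ifs with hodd <;> omega

def party (lisborn : List (List Int)) : List Int :=
  if lisborn.length = 2 then
    wwcdA (PySem.List.pyGetD lisborn 0 []) (PySem.List.pyGetD lisborn 1 [])
  else if lisborn.length = 1 then
    PySem.List.pyGetD lisborn 0 []
  else if lisborn.length = 0 then
    []  -- totality guard: the Python recurses forever on []; excluded by Pre_party
  else
    let pvt := pvtA (lisborn.length : Int)
    let apt := party (PySem.List.slice lisborn (some 0) (some (pvt + 1)))
    let bpt := party (PySem.List.slice lisborn (some (pvt + 1)) (some (lisborn.length : Int)))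
    wwcdA apt bpt
termination_by lisborn.length
decreasing_by
  all_goals
    have h3 : 3 ≤ lisborn.length := by omega
    rw [pvtA_succ lisborn.length h3]
    simp only [PySem.List.length_slice]
    have c0 : PySem.List.clampIdx lisborn.length 0 = 0 := by
      simpa using PySem.List.clampIdx_natCast lisborn.length 0
    simp only [PySem.List.clampIdx_natCast, c0]
    omega

-- ===== PORT B =====
-- B's local helper _beats (same comparison rule, B's own copy)
def beatsB (a b : List Int) : List Int :=
  let d := PySem.List.pyGetD a 0 0 - PySem.List.pyGetD b 0 0
  if d = 1 ∨ d = -2 then a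
  else if d = -1 ∨ d = 2 then b
  else a

-- worklist entry: some seg = pending segment, none = deferred combine
def pvTaskWeight (t : Option (List (List Int))) : Nat :=
  match t with
  | none => 1
  | some s => 3 * s.length - 2

def partyLoop (work : List (Option (List (List Int)))) (results : List (List Int)) : List Int :=
  match work with
  | [] => results.headD []            -- results[0]; empty only on excluded input
  | none :: rest =>
      match results with
      | b :: a :: rs => partyLoop rest (beatsB a b :: rs)
      | _ => []                       -- unreachable: a combine always finds two results
  | some seg :: rest =>
      if h : 3 ≤ seg.length then
        let k := (seg.length + 1) / 2
        partyLoop (some (seg.take k) :: some (seg.drop k) :: none :: rest) results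
      else
        match seg with
        | [] => []                    -- Python raises IndexError here; excluded by Pre_party
        | [x] => partyLoop rest (x :: results)
        | x :: y :: _ => partyLoop rest (beatsB x y :: results)
termination_by (work.map pvTaskWeight).sum
decreasing_by
  all_goals
    simp only [List.map_cons, List.sum_cons, pvTaskWeight, List.length_take,
      List.length_drop, List.length_cons] <;> omega

def party_alt (lisborn : List (List Int)) : List Int := partyLoop [some lisborn] []

-- ===== PRECONDITION & SPEC =====
-- Pre_party excludes the empty list (A recurses forever: RecursionError) and, for two or
-- more players, any empty inner list (the comparison a[0] - b[0] raises IndexError).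
def Pre_party (lisborn : List (List Int)) : Prop :=
  lisborn ≠ [] ∧ (lisborn.length = 1 ∨ ∀ x ∈ lisborn, x ≠ [])
instance (lisborn : List (List Int)) : Decidable (Pre_party lisborn) := by
  unfold Pre_party; infer_instance

def pvWitness_party : List (List Int) := [[1], [2], [0]]

def Spec_party (lisborn : List (List Int)) (out : List Int) : Prop := out = party_alt lisborn
instance (lisborn : List (List Int)) (out : List Int) : Decidable (Spec_party lisborn out) := by
  unfold Spec_party; infer_instance

-- ===== CLAIM (what is proved, stated in full; the proofs are below) =====
def Claim_equal_party : Prop :=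
  ∀ (lisborn : List (List Int)), Dom_party lisborn → Pre_party lisborn →
    Spec_party lisborn (party lisborn)

-- ===== LEMMAS AND PROOFS =====

-- A's split step: for length ≥ 3, party splits at k = ⌈n/2⌉ (take/drop form)
lemma party_split (l : List (List Int)) (h : 3 ≤ l.length) :
    party l = wwcdA (party (l.take ((l.length + 1) / 2)))
                    (party (l.drop ((l.length + 1) / 2))) := by
  rw [party]
  have h2 : ¬ l.length = 2 := by omega
  have h1 : ¬ l.length = 1 := by omega
  have h0 : ¬ l.length = 0 := by omega
  simp only [h2, h1, h0, if_false]
  have hk := pvtA_succ l.length h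
  rw [hk]
  rw [show ((0:Int)) = ((0:Nat):Int) by norm_num,
      PySem.List.slice_natCast, PySem.List.slice_natCast]
  simp only [List.drop_zero, Nat.sub_zero]
  congr 1
  rw [List.take_of_length_le (by simp)]

-- the loop invariant: evaluating a pending nonempty segment pushes its tournament winner
lemma loop_step (N : Nat) : ∀ (seg : List (List Int)) work results,
    seg.length = N → seg ≠ [] →
    partyLoop (some seg :: work) results = partyLoop work (party seg :: results) := by
  induction N using Nat.strong_induction_on with
  | _ N ih =>
    intro seg work results hN hne
    match seg, hne with
    | [x], _ =>
      have hp : party [x] = x := by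
        rw [party]; simp [PySem.List.pyGetD, PySem.List.pyGet?, PySem.List.pyIdx?]
      rw [partyLoop, dif_neg (by simp), hp]
    | [x, y], _ =>
      have hp : party [x, y] = wwcdA x y := by
        rw [party]; simp [PySem.List.pyGetD, PySem.List.pyGet?, PySem.List.pyIdx?]
      have hb : beatsB x y = wwcdA x y := rfl
      rw [partyLoop, dif_neg (by simp), hp, ← hb]
    | a :: b :: c :: t, _ =>
      have h3 : 3 ≤ (a :: b :: c :: t).length := by simp
      set l := a :: b :: c :: t with hl
      rw [partyLoop]
      simp only [h3, dif_pos]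
      set k := (l.length + 1) / 2 with hkdef
      have hk1 : 1 ≤ k := by simp [hkdef]; omega
      have hkl : k < l.length := by simp [hkdef] at *; omega
      have htne : l.take k ≠ [] := by
        intro hc; have := congrArg List.length hc; simp at this; omega
      have hdne : l.drop k ≠ [] := by
        intro hc; have := congrArg List.length hc; simp at this; omega
      rw [ih (l.take k).length (by simp; omega) _ _ _ rfl htne]
      rw [ih (l.drop k).length (by simp; omega) _ _ _ rfl hdne]
      rw [partyLoop]
      rw [party_split l h3, ← hkdef]
      rfl

-- ===== VERDICT (by name: the statement is the Claim_ definition above) =====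
theorem party_spec : Claim_equal_party := by
  intro l _ hpre
  unfold Spec_party party_alt
  rw [loop_step l.length l [] [] rfl hpre.1]
  rw [partyLoop]
  rfl
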